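-- pv_equiv track=rewrite | github.com/DmitryBozhko/CPU-Design-and-Simulation-Project | src/numeric_core/float32.py | _normalize_bits_to_width
-- ===== SOURCE A (Python) =====
-- def _normalize_bits_to_width(bits: list[int], width: int) -> list[int]:
--     # AI-BEGIN
--     """Clamp or zero-extend a bit vector to the requested width."""
--     # AI-END
--     normalized: list[int] = []
--     length = len(bits)
--     index = 0
--     while index < width:
--         if index < length:
--             normalized.append(bits[index] & 1)
--         else:
--             normalized.append(0)
--         index = index + 1
--     return normalized
-- ===== SOURCE B (Python) =====
-- def _normalize_bits_to_width(bits: list[int], width: int) -> list[int]: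
--     """Clamp or zero-extend a bit vector to the requested width."""
--     value = 0
--     for b in reversed(bits):
--         value = (value << 1) + (b & 1)
--     out: list[int] = []
--     for _ in range(width):
--         out.append(value & 1)
--         value >>= 1
--     return out
-- ===== Notes on version B (the rewrite author's own statement) =====
-- stated objective: alternative
-- what changed: B packs the whole bit list into a single arbitrary-precision integer with Horner's rule (value = value*2 + (b & 1) over the reversed list) and then produces the output by peeling the low bit off that integer width times, instead of A's per-index walk over the list with an in-range/out-of-range branch.
import Mathlib
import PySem

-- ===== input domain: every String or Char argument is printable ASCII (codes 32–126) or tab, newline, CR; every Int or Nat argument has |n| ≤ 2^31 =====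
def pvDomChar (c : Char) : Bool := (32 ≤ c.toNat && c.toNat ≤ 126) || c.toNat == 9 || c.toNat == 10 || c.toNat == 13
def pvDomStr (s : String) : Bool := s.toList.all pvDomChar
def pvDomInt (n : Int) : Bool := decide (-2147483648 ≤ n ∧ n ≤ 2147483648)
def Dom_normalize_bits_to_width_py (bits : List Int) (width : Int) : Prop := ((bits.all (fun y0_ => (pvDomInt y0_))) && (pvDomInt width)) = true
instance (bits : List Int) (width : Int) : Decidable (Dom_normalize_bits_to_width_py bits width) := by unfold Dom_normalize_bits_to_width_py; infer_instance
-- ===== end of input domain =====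

-- B packs the bit list into one integer by Horner's rule and then peels off the low `width` bits, instead of A's per-index loop over the list (alternative algorithm; not faster: the big-integer shifts cost more than A's list walk on large inputs).


-- ===== PORT A =====
-- while index < width: append bits[index] & 1 (in range) or 0; index += 1
def pvLoopA (bits : List Int) (width length index : Int) (normalized : List Int) : List Int :=
  if index < width then
    pvLoopA bits width length (index + 1)
      (normalized ++ [if index < length then PySem.Int.band ((PySem.List.pyGet? bits index).getD 0) 1 else 0])
  else normalized
termination_by (width - index).toNat
decreasing_by omega

def normalize_bits_to_width_py (bits : List Int) (width : Int) : List Int :=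
  pvLoopA bits width (bits.length : Int) 0 []

-- ===== PORT B =====
-- for _ in range(width): out.append(value & 1); value >>= 1
def pvPeel (s : List Int × Int) (_ : Int) : List Int × Int :=
  (s.1 ++ [PySem.Int.band s.2 1], s.2 >>> (1 : Nat))

def normalize_bits_to_width_py_alt (bits : List Int) (width : Int) : List Int :=
  -- value = 0; for b in reversed(bits): value = (value << 1) + (b & 1)
  let value : Int := bits.reverse.foldl (fun v b => (v <<< (1 : Nat)) + PySem.Int.band b 1) 0
  ((PySem.List.pyRange 0 width 1).foldl pvPeel ([], value)).1

-- ===== PRECONDITION & SPEC =====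
def Spec_normalize_bits_to_width_py (bits : List Int) (width : Int) (out : List Int) : Prop := out = normalize_bits_to_width_py_alt bits width
instance (bits : List Int) (width : Int) (out : List Int) : Decidable (Spec_normalize_bits_to_width_py bits width out) := by unfold Spec_normalize_bits_to_width_py; infer_instance

-- ===== CLAIM (what is proved, stated in full; the proofs are below) =====
def Claim_equal_normalize_bits_to_width_py : Prop := ∀ (bits : List Int) (width : Int), Dom_normalize_bits_to_width_py bits width → Spec_normalize_bits_to_width_py bits width (normalize_bits_to_width_py bits width)

-- ===== LEMMAS AND PROOFS =====

lemma band_one' (b : Int) : PySem.Int.band b 1 = b % 2 := by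
  rw [PySem.Int.band_one]; simp [PySem.Int.mod, Int.fmod_eq_emod]

-- Horner form of B's packing loop
def pvHorner (bits : List Int) : Int := bits.foldr (fun b v => (v <<< (1 : Nat)) + PySem.Int.band b 1) 0

lemma pack_eq_horner (bits : List Int) :
    bits.reverse.foldl (fun (v : Int) b => (v <<< (1 : Nat)) + PySem.Int.band b 1) (0 : Int) = pvHorner bits := by
  rw [List.foldl_reverse]; rfl

lemma horner_cons (b : Int) (t : List Int) : pvHorner (b :: t) = 2 * pvHorner t + b % 2 := by
  simp only [pvHorner, List.foldr_cons]
  rw [Int.shiftLeft_eq, band_one']; ring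

lemma horner_nonneg (bits : List Int) : 0 ≤ pvHorner bits := by
  induction bits with
  | nil => simp [pvHorner]
  | cons b t ih =>
    have h : 0 ≤ b % 2 := Int.emod_nonneg b (by norm_num)
    rw [horner_cons]; omega

lemma ediv_two_pow_succ (v : Int) (i : Nat) : v / 2 ^ (i + 1) = (v / 2) / 2 ^ i := by
  rw [pow_succ, mul_comm ((2:Int)^i) 2, ← Int.ediv_ediv_of_nonneg (by norm_num : (0:Int) ≤ 2)]

lemma horner_bit (bits : List Int) : ∀ i : Nat,
    pvHorner bits / 2 ^ i % 2 = if h : i < bits.length then bits[i] % 2 else 0 := by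
  induction bits with
  | nil => intro i; simp [pvHorner]
  | cons b t ih =>
    intro i
    have hH := horner_nonneg t
    have hr0 : 0 ≤ b % 2 := Int.emod_nonneg b (by norm_num)
    have hr1 : b % 2 < 2 := Int.emod_lt_of_pos b (by norm_num)
    cases i with
    | zero =>
      rw [horner_cons]
      simp only [pow_zero, Int.ediv_one, List.length_cons, Nat.zero_lt_succ, dif_pos,
        List.getElem_cons_zero]
      omega
    | succ i =>
      rw [horner_cons, ediv_two_pow_succ]
      have h2 : (2 * pvHorner t + b % 2) / 2 = pvHorner t := by omega
      rw [h2, ih i]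
      by_cases h : i < t.length
      · rw [dif_pos h, dif_pos (by simpa using Nat.succ_lt_succ h)]
        simp
      · rw [dif_neg h, dif_neg (by simpa using fun hh => h (Nat.lt_of_succ_lt_succ hh))]

-- B's peeling loop appends v%2, v/2%2, v/4%2, …
lemma peel_spec (l : List Int) : ∀ (v : Int) (acc : List Int),
    (l.foldl pvPeel (acc, v)).1 = acc ++ (List.range l.length).map (fun i => v / 2 ^ i % 2) := by
  induction l with
  | nil => intro v acc; simp
  | cons x l ih =>
    intro v acc
    rw [List.foldl_cons]
    show (l.foldl pvPeel (acc ++ [PySem.Int.band v 1], v >>> (1 : Nat))).1 = _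
    rw [ih]
    have hs : v >>> (1 : Nat) = v / 2 := by rw [Int.shiftRight_eq_div_pow]; norm_num
    rw [hs, band_one', List.length_cons, List.range_succ_eq_map, List.map_cons, List.map_map]
    simp only [pow_zero, Int.ediv_one]
    have : ((fun i => v / 2 ^ i % 2) ∘ Nat.succ) = fun i => v / 2 / 2 ^ i % 2 := by
      funext i
      simp [Function.comp, ediv_two_pow_succ]
    rw [this]
    simp

-- the loop's accumulator is only ever appended to
lemma pvLoopA_acc (n : Nat) : ∀ (bits : List Int) (width length index : Int) (acc : List Int),
    (width - index).toNat = n →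
    pvLoopA bits width length index acc = acc ++ pvLoopA bits width length index [] := by
  induction n with
  | zero =>
    intro bits width length index acc h
    conv_lhs => rw [pvLoopA]
    conv_rhs => rw [pvLoopA]
    rw [if_neg (show ¬ index < width by omega), if_neg (show ¬ index < width by omega)]
    simp
  | succ n ih =>
    intro bits width length index acc h
    conv_lhs => rw [pvLoopA]
    conv_rhs => rw [pvLoopA]
    rw [if_pos (show index < width by omega), if_pos (show index < width by omega)]
    rw [ih bits width length (index + 1) (acc ++ [(if index < length then PySem.Int.band ((PySem.List.pyGet? bits index).getD 0) 1 else 0)]) (by omega),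
        ih bits width length (index + 1) ([] ++ [(if index < length then PySem.Int.band ((PySem.List.pyGet? bits index).getD 0) 1 else 0)]) (by omega)]
    simp

-- characterization of the loop started at `index` with empty accumulator
lemma pvLoopA_eq (n : Nat) : ∀ (bits : List Int) (width index : Int), 0 ≤ index →
    (width - index).toNat = n →
    pvLoopA bits width (bits.length : Int) index [] =
      ((bits.drop index.toNat).take n).map (fun b => PySem.Int.band b 1)
        ++ List.replicate (n - (bits.length - index.toNat)) 0 := by
  induction n with
  | zero =>
    intro bits width index _ h
    conv_lhs => rw [pvLoopA]
    rw [if_neg (by omega)]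
    simp
  | succ n ih =>
    intro bits width index hnn h
    conv_lhs => rw [pvLoopA]
    rw [if_pos (by omega)]
    rw [pvLoopA_acc n bits width (bits.length : Int) (index + 1) _ (by omega)]
    rw [ih bits width (index + 1) (by omega) (by omega)]
    by_cases hlt : index < (bits.length : Int)
    · rw [if_pos hlt]
      have hidx : index.toNat < bits.length := by omega
      have hdrop : bits.drop index.toNat = bits[index.toNat] :: bits.drop (index.toNat + 1) :=
        List.drop_eq_getElem_cons hidx
      have hget : (PySem.List.pyGet? bits index).getD 0 = bits[index.toNat] := by
        have h0 : PySem.List.pyGet? bits index = bits[index.toNat]? := by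
          conv_lhs => rw [show index = ((index.toNat : Nat) : Int) by omega,
            PySem.List.pyGet?_natCast]
        rw [h0, List.getElem?_eq_getElem hidx]
        rfl
      have htn : (index + 1).toNat = index.toNat + 1 := by omega
      rw [hget, hdrop, htn, List.take_succ_cons, List.map_cons]
      have hrep : (n + 1) - (bits.length - index.toNat) = n - (bits.length - (index.toNat + 1)) := by
        omega
      rw [hrep]
      simp
    · rw [if_neg hlt]
      have hge : bits.length ≤ index.toNat := by omega
      have htn : (index + 1).toNat = index.toNat + 1 := by omega
      rw [htn, List.drop_eq_nil_of_le hge, List.drop_eq_nil_of_le (by omega)]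
      have h1 : (n + 1) - (bits.length - index.toNat) = n + 1 := by omega
      have h2 : n - (bits.length - (index.toNat + 1)) = n := by omega
      rw [h1, h2]
      simp [List.replicate_succ]

-- ===== VERDICT (by name: the statement is the Claim_ definition above) =====
theorem normalize_bits_to_width_py_spec : Claim_equal_normalize_bits_to_width_py := by
  intro bits width _
  simp only [Spec_normalize_bits_to_width_py, normalize_bits_to_width_py, normalize_bits_to_width_py_alt]
  rw [pack_eq_horner, peel_spec, PySem.List.length_pyRange_one]
  rw [pvLoopA_eq width.toNat bits width 0 (by omega) (by omega)]
  have hw : (width - 0).toNat = width.toNat := by omega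
  rw [hw]
  simp only [Int.toNat_zero, List.drop_zero, List.nil_append]
  apply List.ext_getElem
  · simp only [List.length_append, List.length_map, List.length_take, List.length_replicate,
      List.length_range]
    omega
  · intro i h1 h2
    have hi : i < width.toNat := by
      simpa using h2
    have hR : (List.map (fun i => pvHorner bits / 2 ^ i % 2) (List.range width.toNat))[i]'h2 =
        pvHorner bits / 2 ^ i % 2 := by
      rw [List.getElem_map, List.getElem_range]
    rw [hR, horner_bit]
    by_cases hlen : i < bits.length
    · rw [dif_pos hlen]
      rw [List.getElem_append_left (by simp; omega)]
      rw [List.getElem_map, List.getElem_take, band_one']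
    · rw [dif_neg hlen]
      rw [List.getElem_append_right (by simp; omega)]
      simp
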